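-- pv_equiv track=rewrite | github.com/pypi-data/pypi-mirror-155 | packages/ccheck-2l42h3r/ccheck_2l42h3r-1.0.4-py3-none-any.whl/ccheck/utils/arrays.py | check_for_ordered_subarray
-- ===== SOURCE A (Python) =====
-- from typing import List, Optional, TypeVar
--
-- T = TypeVar("T")
--
-- def check_for_ordered_subarray(array: List[T], subarray: List[T]) -> bool:
--     """Return true if a subarray can be found within given array (with correct order kept)"""
--     match = False
--
--     try:
--         for master_index, master_element in enumerate(array):
--             if master_element == subarray[0]:
--                 match = True
--                 for sub_index, sub_element in enumerate(subarray):
--                     if array[master_index + sub_index] != sub_element: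
--                         match = False
--                 if match is True:
--                     return match
--     except IndexError:
--         return False
--     return match
-- ===== SOURCE B (Python) =====
-- def check_for_ordered_subarray(array, subarray):
--     """Rabin-Karp: rolling-hash scan with verification on hash hit (empty subarray -> False)."""
--     n, m = len(subarray), len(array)
--     if n == 0 or m < n:
--         return False
--     B, M = 1000003, (1 << 61) - 1
--     target = 0
--     for x in subarray:
--         target = (target * B + x) % M
--     h = 0
--     for x in array[:n]:
--         h = (h * B + x) % M
--     power = pow(B, n - 1, M)
--     for i in range(m - n + 1):
--         if h == target and array[i:i + n] == subarray:
--             return True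
--         if i + n < m:
--             h = ((h - array[i] * power) * B + array[i + n]) % M
--     return False
-- ===== Notes on version B (the rewrite author's own statement) =====
-- stated objective: alternative
-- what changed: Replaces A's naive double loop (compare every window element by element from each matching first element, with try/except control flow) by a Rabin-Karp search: a polynomial rolling hash of the current window is maintained in O(1) per shift and the window is compared to the subarray only on a hash hit.
import Mathlib
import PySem

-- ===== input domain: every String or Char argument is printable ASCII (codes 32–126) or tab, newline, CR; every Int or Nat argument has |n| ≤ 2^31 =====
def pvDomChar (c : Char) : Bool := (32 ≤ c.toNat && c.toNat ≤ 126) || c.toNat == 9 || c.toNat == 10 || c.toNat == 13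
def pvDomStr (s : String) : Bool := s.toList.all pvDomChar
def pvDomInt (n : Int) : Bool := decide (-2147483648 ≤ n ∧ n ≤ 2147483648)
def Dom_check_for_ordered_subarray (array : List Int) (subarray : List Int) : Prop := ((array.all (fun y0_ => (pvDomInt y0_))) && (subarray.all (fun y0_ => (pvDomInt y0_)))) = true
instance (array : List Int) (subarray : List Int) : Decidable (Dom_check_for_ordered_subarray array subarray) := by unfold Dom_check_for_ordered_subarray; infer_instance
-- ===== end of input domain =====

-- B replaces A's naive double loop (element-by-element window compare behind a first-element
-- filter and try/except) by a Rabin-Karp search: a polynomial rolling hash of the current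
-- window, updated in O(1) per shift, with a full window compare only on a hash hit.

-- ===== PORT A =====
-- inner 'for sub_index, sub_element in enumerate(subarray)' loop; m = the 'match' flag;
-- 'none' models an IndexError escaping from 'array[master_index + sub_index]'
def pvAInner (array : List Int) (mi : Int) : List (Int × Int) → Bool → Option Bool
  | [], m => some m
  | (si, se) :: rest, m =>
    match PySem.List.pyGet? array (mi + si) with
    | none => none
    | some x => pvAInner array mi rest (if x ≠ se then false else m)

-- outer 'for master_index, master_element in enumerate(array)' loop;
-- 'subarray[0]' raising IndexError (or any inner IndexError) is caught: 'return False'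
def pvAOuter (array : List Int) (subarray : List Int) : List (Int × Int) → Bool
  | [] => false
  | (mi, me) :: rest =>
    match PySem.List.pyGet? subarray 0 with
    | none => false
    | some s0 =>
      if me = s0 then
        match pvAInner array mi (PySem.List.enumerate subarray 0) true with
        | none => false
        | some true => true
        | some false => pvAOuter array subarray rest
      else pvAOuter array subarray rest

def check_for_ordered_subarray (array : List Int) (subarray : List Int) : Bool :=
  pvAOuter array subarray (PySem.List.enumerate array 0)

-- ===== PORT B =====
-- 'h = (h * B + x) % M' (B = 1000003, M = 2**61 - 1)
def pvHashStep (h x : Int) : Int := PySem.Int.mod (h * 1000003 + x) 2305843009213693951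

-- 'for i in range(m - n + 1): if h == target and array[i:i+n] == subarray: return True;
--  if i + n < m: h = ((h - array[i] * power) * B + array[i + n]) % M'
-- (array[i] / array[i+n] are in range whenever taken, so '.getD 0' is never used)
def pvRollLoop (array sub : List Int) (target pw : Int) : List Int → Int → Bool
  | [], _ => false
  | i :: rest, h =>
    if h = target ∧ PySem.List.slice array (some i) (some (i + (sub.length : Int))) = sub then
      true
    else
      pvRollLoop array sub target pw rest
        (if i + (sub.length : Int) < (array.length : Int) then
          PySem.Int.mod ((h - ((PySem.List.pyGet? array i).getD 0) * pw) * 1000003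
            + (PySem.List.pyGet? array (i + (sub.length : Int))).getD 0) 2305843009213693951
        else h)

def check_for_ordered_subarray_alt (array : List Int) (subarray : List Int) : Bool :=
  if subarray.length = 0 ∨ array.length < subarray.length then false
  else
    let target := subarray.foldl pvHashStep 0
    let h := (PySem.List.slice array none (some (subarray.length : Int))).foldl pvHashStep 0
    -- 'pow(B, n - 1, M)' ported as its value B^(n-1) mod M
    let pw := PySem.Int.mod ((1000003 : Int) ^ (subarray.length - 1)) 2305843009213693951
    pvRollLoop array subarray target pw
      (PySem.List.pyRange 0 ((array.length : Int) - (subarray.length : Int) + 1) 1) h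

-- ===== PRECONDITION & SPEC =====
def Spec_check_for_ordered_subarray (array : List Int) (subarray : List Int) (out : Bool) : Prop := out = check_for_ordered_subarray_alt array subarray
instance (array : List Int) (subarray : List Int) (out : Bool) : Decidable (Spec_check_for_ordered_subarray array subarray out) := by unfold Spec_check_for_ordered_subarray; infer_instance

-- ===== CLAIM (what is proved, stated in full; the proofs are below) =====
def Claim_equal_check_for_ordered_subarray : Prop := ∀ (array : List Int) (subarray : List Int), Dom_check_for_ordered_subarray array subarray → Spec_check_for_ordered_subarray array subarray (check_for_ordered_subarray array subarray)

-- ===== LEMMAS AND PROOFS =====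

-- the common characterisation: the length-|sub| window of array starting at i equals sub
def pvMatchAt (array sub : List Int) (i : Nat) : Prop :=
  i + sub.length ≤ array.length ∧ (array.drop i).take sub.length = sub

theorem pvAInner_spec (array : List Int) (mi : Nat) (sub' : List Int) :
    ∀ (s : Nat) (m : Bool), pvAInner array (mi : Int) (PySem.List.enumerate sub' (s : Int)) m =
      if sub'.length = 0 then some m
      else if mi + s + sub'.length ≤ array.length then
        some (m && decide ((array.drop (mi + s)).take sub'.length = sub'))
      else none := by
  induction sub' with
  | nil => intro s m; simp [PySem.List.enumerate_nil, pvAInner]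
  | cons se rest ih =>
    intro s m
    rw [PySem.List.enumerate_cons]
    simp only [pvAInner]
    have hcast : (mi : Int) + (s : Int) = ((mi + s : Nat) : Int) := by push_cast; ring
    rw [hcast, PySem.List.pyGet?_natCast]
    by_cases hlt : mi + s < array.length
    · rw [List.getElem?_eq_getElem hlt]
      simp only []
      have hs1 : ((s : Int) + 1) = ((s + 1 : Nat) : Int) := by push_cast; ring
      rw [hs1, ih (s + 1)]
      have hdrop : array.drop (mi + s) = array[mi + s] :: array.drop (mi + s + 1) :=
        List.drop_eq_getElem_cons hlt
      by_cases hr : rest.length = 0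
      · have hrn : rest = [] := List.length_eq_zero_iff.1 hr
        subst hrn
        have hle : mi + s + (se :: ([] : List Int)).length ≤ array.length := by
          simp only [List.length_cons, List.length_nil]; omega
        rw [if_pos hr, if_neg (show ¬ (se :: ([] : List Int)).length = 0 by simp),
          if_pos hle]
        have htake : (array.drop (mi + s)).take 1 = [array[mi + s]] := by
          rw [hdrop]; rfl
        simp only [List.length_cons, List.length_nil, htake]
        by_cases he : array[mi + s] = se <;> simp [he] <;> tauto
      · rw [if_neg hr]
        by_cases hle : mi + s + (se :: rest).length ≤ array.length
        · have h2 : mi + (s + 1) + rest.length ≤ array.length := by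
            simp only [List.length_cons] at hle; omega
          rw [if_pos h2, if_neg (show ¬ (se :: rest).length = 0 by simp), if_pos hle]
          have hshift : mi + (s + 1) = mi + s + 1 := by omega
          have htake : (array.drop (mi + s)).take (rest.length + 1) =
              array[mi + s] :: (array.drop (mi + s + 1)).take rest.length := by
            rw [hdrop, List.take_succ_cons]
          simp only [List.length_cons, htake, hshift, List.cons.injEq]
          by_cases he : array[mi + s] = se <;> simp [he]
        · have h2 : ¬ (mi + (s + 1) + rest.length ≤ array.length) := by
            simp only [List.length_cons] at hle; omega
          rw [if_neg h2, if_neg (show ¬ (se :: rest).length = 0 by simp), if_neg hle]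
    · rw [List.getElem?_eq_none (by omega)]
      simp only []
      rw [if_neg (show ¬ (se :: rest).length = 0 by simp),
        if_neg (show ¬ (mi + s + (se :: rest).length ≤ array.length) by
          simp only [List.length_cons]; omega)]

theorem pvAOuter_spec (array sub : List Int) (hsub : sub ≠ []) :
    ∀ (l : List Int) (k : Nat), array.drop k = l →
      (pvAOuter array sub (PySem.List.enumerate l (k : Int)) = true ↔
        ∃ i : Nat, k ≤ i ∧ pvMatchAt array sub i) := by
  obtain ⟨s0, tl, rfl⟩ := List.exists_cons_of_ne_nil hsub
  intro l
  induction l with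
  | nil =>
    intro k hk
    rw [PySem.List.enumerate_nil]
    simp only [pvAOuter, Bool.false_eq_true, false_iff]
    rintro ⟨i, hki, hle, _⟩
    have hlen : array.length ≤ k := by
      have := congrArg List.length hk
      simp at this; omega
    simp only [List.length_cons] at hle
    omega
  | cons me l' ih =>
    intro k hk
    have hklt : k < array.length := by
      have := congrArg List.length hk
      simp [List.length_drop] at this; omega
    have hme : array[k] = me := by
      have h0 : (array.drop k)[0]'(by rw [hk]; simp) = me := by
        simp [hk]
      simpa using h0
    have hk' : array.drop (k + 1) = l' := by
      have := congrArg List.tail hk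
      simpa [List.tail_drop] using this
    rw [PySem.List.enumerate_cons]
    simp only [pvAOuter]
    rw [show ((k : Int) + 1) = ((k + 1 : Nat) : Int) by push_cast; ring]
    have hget0 : PySem.List.pyGet? (s0 :: tl) (0 : Int) = some s0 := by
      rw [PySem.List.pyGet?_zero]; rfl
    rw [hget0]
    simp only []
    have hinner := pvAInner_spec array k (s0 :: tl) 0 true
    rw [show ((0 : Nat) : Int) = (0 : Int) by norm_num] at hinner
    rw [if_neg (show ¬ (s0 :: tl).length = 0 by simp)] at hinner
    simp only [Nat.add_zero, List.length_cons] at hinner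
    by_cases hme0 : me = s0
    · rw [if_pos hme0]
      by_cases hle : k + (tl.length + 1) ≤ array.length
      · rw [if_pos hle] at hinner
        by_cases hm : (array.drop k).take (tl.length + 1) = s0 :: tl
        · have hiv : pvAInner array (k : Int) (PySem.List.enumerate (s0 :: tl) 0) true
              = some true := by rw [hinner]; simp [hm]
          rw [hiv]
          simp only [true_iff]
          exact ⟨k, le_refl k, by simpa using hle, by simpa using hm⟩
        · have hiv : pvAInner array (k : Int) (PySem.List.enumerate (s0 :: tl) 0) true
              = some false := by rw [hinner]; simp [hm]
          rw [hiv]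
          simp only []
          rw [ih (k + 1) hk']
          constructor
          · rintro ⟨i, hki, hmi⟩; exact ⟨i, by omega, hmi⟩
          · rintro ⟨i, hki, hmi⟩
            refine ⟨i, ?_, hmi⟩
            rcases Nat.eq_or_lt_of_le hki with heq | h
            · exfalso; subst heq; exact hm (by simpa using hmi.2)
            · omega
      · rw [if_neg hle] at hinner
        have hiv : pvAInner array (k : Int) (PySem.List.enumerate (s0 :: tl) 0) true
            = none := hinner
        rw [hiv]
        simp only [Bool.false_eq_true, false_iff]
        rintro ⟨i, hki, hil, _⟩
        simp only [List.length_cons] at hil hle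
        omega
    · rw [if_neg hme0, ih (k + 1) hk']
      constructor
      · rintro ⟨i, hki, hmi⟩; exact ⟨i, by omega, hmi⟩
      · rintro ⟨i, hki, hmi⟩
        refine ⟨i, ?_, hmi⟩
        rcases Nat.eq_or_lt_of_le hki with heq | h
        · exfalso
          subst heq
          obtain ⟨hil, htk⟩ := hmi
          have hcons : (array.drop k).take (s0 :: tl).length =
              array[k] :: (array.drop (k + 1)).take tl.length := by
            rw [List.drop_eq_getElem_cons hklt, List.length_cons, List.take_succ_cons]
          rw [hcons, hme] at htk
          injection htk with h1 _
          exact hme0 h1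
        · omega

-- ---- B side: rolling-hash lemmas ----

-- the unreduced polynomial value of a list (Horner form)
def pvP (l : List Int) : Int := l.foldl (fun h x => h * 1000003 + x) 0

theorem pvP_aux (l : List Int) : ∀ a : Int,
    l.foldl (fun h x => h * 1000003 + x) a = a * 1000003 ^ l.length + pvP l := by
  induction l with
  | nil => intro a; simp [pvP]
  | cons x t ih =>
    intro a
    simp only [List.foldl_cons, List.length_cons]
    rw [ih (a * 1000003 + x),
      show pvP (x :: t) = List.foldl (fun h x => h * 1000003 + x) (0 * 1000003 + x) t from rfl,
      ih (0 * 1000003 + x)]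
    ring

theorem pvP_cons (x : Int) (t : List Int) :
    pvP (x :: t) = x * 1000003 ^ t.length + pvP t := by
  show (x :: t).foldl (fun h x => h * 1000003 + x) 0 = _
  simp only [List.foldl_cons]
  rw [pvP_aux t (0 * 1000003 + x)]
  ring

theorem pvP_snoc (t : List Int) (y : Int) :
    pvP (t ++ [y]) = pvP t * 1000003 + y := by
  show (t ++ [y]).foldl (fun h x => h * 1000003 + x) 0 = _
  rw [List.foldl_append]
  rfl

theorem pvHash_eq_mod (l : List Int) : ∀ b : Int,
    l.foldl pvHashStep (b % 2305843009213693951) =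
      (l.foldl (fun h x => h * 1000003 + x) b) % 2305843009213693951 := by
  induction l with
  | nil => intro b; simp
  | cons x t ih =>
    intro b
    simp only [List.foldl_cons]
    have hstep : pvHashStep (b % 2305843009213693951) x =
        (b * 1000003 + x) % 2305843009213693951 := by
      unfold pvHashStep
      rw [PySem.Int.mod_eq_emod_of_pos (show (0:Int) < 2305843009213693951 by norm_num)]
      have hb : b % 2305843009213693951 ≡ b [ZMOD 2305843009213693951] :=
        Int.emod_emod_of_dvd b dvd_rfl
      exact (hb.mul_right 1000003).add_right x
    rw [hstep, ih (b * 1000003 + x)]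

theorem pvHash_eq (l : List Int) : l.foldl pvHashStep 0 = pvP l % 2305843009213693951 := by
  have h := pvHash_eq_mod l 0
  rw [show (0 : Int) % 2305843009213693951 = 0 by norm_num] at h
  exact h

-- the rolling update carries the hash of window i to the hash of window i+1
theorem pvRoll_step (array : List Int) (n i : Nat) (hn : 0 < n) (hlt : i + n < array.length) :
    PySem.Int.mod
      ((pvP ((array.drop i).take n) % 2305843009213693951
          - (array[i]'(by omega)) *
              (PySem.Int.mod ((1000003 : Int) ^ (n - 1)) 2305843009213693951)) * 1000003
        + array[i + n]'hlt) 2305843009213693951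
      = pvP ((array.drop (i + 1)).take n) % 2305843009213693951 := by
  rw [PySem.Int.mod_eq_emod_of_pos (show (0:Int) < 2305843009213693951 by norm_num)]
  obtain ⟨n', rfl⟩ : ∃ n', n = n' + 1 := ⟨n - 1, by omega⟩
  have hi : i < array.length := by omega
  set a := array[i]'hi with ha
  set y := array[i + (n' + 1)]'hlt with hy
  set t := (array.drop (i + 1)).take n' with ht
  have htlen : t.length = n' := by
    rw [ht, List.length_take, List.length_drop]; omega
  have hwin : (array.drop i).take (n' + 1) = a :: t := by
    rw [List.drop_eq_getElem_cons hi, List.take_succ_cons]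
  have hget : (array.drop (i + 1))[n']? = some y := by
    rw [List.getElem?_drop, show i + 1 + n' = i + (n' + 1) by omega,
      List.getElem?_eq_getElem hlt]
  have hwin' : (array.drop (i + 1)).take (n' + 1) = t ++ [y] := by
    rw [List.take_add_one, hget]
    rfl
  rw [hwin, hwin', pvP_cons, htlen, pvP_snoc,
    PySem.Int.mod_eq_emod_of_pos (show (0:Int) < 2305843009213693951 by norm_num)]
  simp only [Nat.add_sub_cancel]
  have hm : (a * 1000003 ^ n' + pvP t) % 2305843009213693951
      ≡ a * 1000003 ^ n' + pvP t [ZMOD 2305843009213693951] :=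
    Int.emod_emod_of_dvd _ dvd_rfl
  have hp : ((1000003 : Int) ^ n') % 2305843009213693951
      ≡ (1000003 : Int) ^ n' [ZMOD 2305843009213693951] :=
    Int.emod_emod_of_dvd _ dvd_rfl
  calc ((a * 1000003 ^ n' + pvP t) % 2305843009213693951
        - a * (((1000003 : Int) ^ n') % 2305843009213693951)) * 1000003 + y
      ≡ (a * 1000003 ^ n' + pvP t - a * (1000003 : Int) ^ n') * 1000003 + y
        [ZMOD 2305843009213693951] :=
        ((hm.sub (hp.mul_left a)).mul_right 1000003).add_right y
    _ = pvP t * 1000003 + y := by ring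

-- the main Rabin-Karp loop returns true iff some window at index ≥ i equals sub
theorem pvRollLoop_spec (array sub : List Int) (hn : 0 < sub.length)
    (hnm : sub.length ≤ array.length) :
    ∀ (k i : Nat), i + k = array.length - sub.length + 1 →
      (pvRollLoop array sub (sub.foldl pvHashStep 0)
          (PySem.Int.mod ((1000003 : Int) ^ (sub.length - 1)) 2305843009213693951)
          (PySem.List.pyRange (i : Int) ((array.length : Int) - (sub.length : Int) + 1) 1)
          (pvP ((array.drop i).take sub.length) % 2305843009213693951) = true
        ↔ ∃ j : Nat, i ≤ j ∧ pvMatchAt array sub j) := by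
  intro k
  induction k with
  | zero =>
    intro i hi
    rw [PySem.List.pyRange_one_eq_nil (by omega)]
    simp only [pvRollLoop, Bool.false_eq_true, false_iff]
    rintro ⟨j, hij, hjm, _⟩
    omega
  | succ k ih =>
    intro i hi
    rw [PySem.List.pyRange_one_cons (by omega)]
    simp only [pvRollLoop]
    rw [PySem.List.slice_natCast_add]
    by_cases hwin : (array.drop i).take sub.length = sub
    · rw [if_pos ⟨by rw [hwin, pvHash_eq], hwin⟩]
      simp only [true_iff]
      exact ⟨i, le_refl i, by omega, hwin⟩
    · rw [if_neg (by rintro ⟨-, h2⟩; exact hwin h2)]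
      by_cases hlt : i + sub.length < array.length
      · rw [if_pos (by omega)]
        have hg1 : (PySem.List.pyGet? array (i : Int)).getD 0 = array[i]'(by omega) := by
          rw [PySem.List.pyGet?_natCast, List.getElem?_eq_getElem (by omega)]
          rfl
        have hg2 : (PySem.List.pyGet? array ((i : Int) + (sub.length : Int))).getD 0
            = array[i + sub.length]'hlt := by
          rw [show (i : Int) + (sub.length : Int) = ((i + sub.length : Nat) : Int) by push_cast; ring,
            PySem.List.pyGet?_natCast, List.getElem?_eq_getElem hlt]
          rfl
        rw [hg1, hg2, pvRoll_step array sub.length i hn hlt,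
          show ((i : Int) + 1) = ((i + 1 : Nat) : Int) by push_cast; ring,
          ih (i + 1) (by omega)]
        constructor
        · rintro ⟨j, hij, hj⟩; exact ⟨j, by omega, hj⟩
        · rintro ⟨j, hij, hj⟩
          refine ⟨j, ?_, hj⟩
          rcases Nat.eq_or_lt_of_le hij with heq | h
          · exfalso; subst heq; exact hwin hj.2
          · omega
      · rw [if_neg (by omega)]
        rw [show ((i : Int) + 1) = ((i + 1 : Nat) : Int) by push_cast; ring,
          PySem.List.pyRange_one_eq_nil (by omega)]
        simp only [pvRollLoop, Bool.false_eq_true, false_iff]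
        rintro ⟨j, hij, hjm, hjw⟩
        have : j = i := by omega
        subst this
        exact hwin hjw

-- ===== VERDICT (by name: the statement is the Claim_ definition above) =====
theorem check_for_ordered_subarray_spec : Claim_equal_check_for_ordered_subarray := by
  intro array sub _
  unfold Spec_check_for_ordered_subarray
  by_cases hsub : sub = []
  · subst hsub
    have hB : check_for_ordered_subarray_alt array [] = false := by
      simp [check_for_ordered_subarray_alt]
    rw [hB]
    cases array with
    | nil => rfl
    | cons a t => rfl
  · have hn : 0 < sub.length := List.length_pos_iff.2 hsub
    have hA := pvAOuter_spec array sub hsub array 0 rfl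
    simp only [Nat.cast_zero] at hA
    by_cases hm : array.length < sub.length
    · have hB : check_for_ordered_subarray_alt array sub = false := by
        unfold check_for_ordered_subarray_alt
        rw [if_pos (Or.inr hm)]
      rw [hB]
      rw [show check_for_ordered_subarray array sub
          = pvAOuter array sub (PySem.List.enumerate array 0) from rfl]
      rcases Bool.eq_false_or_eq_true (pvAOuter array sub (PySem.List.enumerate array 0))
        with h | h
      · exfalso
        obtain ⟨j, -, hjm, -⟩ := hA.1 h
        omega
      · exact h
    · rw [Nat.not_lt] at hm
      have hB : check_for_ordered_subarray_alt array sub =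
          pvRollLoop array sub (sub.foldl pvHashStep 0)
            (PySem.Int.mod ((1000003 : Int) ^ (sub.length - 1)) 2305843009213693951)
            (PySem.List.pyRange ((0 : Nat) : Int)
              ((array.length : Int) - (sub.length : Int) + 1) 1)
            (pvP ((array.drop 0).take sub.length) % 2305843009213693951) := by
        unfold check_for_ordered_subarray_alt
        rw [if_neg (by rintro (h | h) <;> omega)]
        simp only [PySem.List.slice_to_natCast, pvHash_eq, List.drop_zero, Nat.cast_zero]
      rw [Bool.eq_iff_iff,
        show check_for_ordered_subarray array sub
          = pvAOuter array sub (PySem.List.enumerate array 0) from rfl,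
        hA, hB, pvRollLoop_spec array sub hn hm (array.length - sub.length + 1) 0 (by omega)]
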